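-- pv_equiv track=rewrite | github.com/umarashraf914/Systems_Biology | services.py | find_unique_genes
-- ===== SOURCE A (Python) =====
-- def find_unique_genes(all_common_genes):
--     """
--     Find genes unique to each prescription.
--     """
--     all_unique_genes = []
--
--     for i, genes in enumerate(all_common_genes):
--         if len(all_common_genes) > 1:
--             other_genes = set().union(*all_common_genes[:i], *all_common_genes[i + 1:])
--             unique_genes = set(genes) - other_genes
--         else:
--             unique_genes = set(genes)
--
--         all_unique_genes.append(unique_genes)
--
--     return all_unique_genes
-- ===== SOURCE B (Python) =====
-- def find_unique_genes(all_common_genes):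
--     """
--     Find genes unique to each prescription.
--     """
--     counts = {}
--     for genes in all_common_genes:
--         for g in set(genes):
--             counts[g] = counts.get(g, 0) + 1
--     return [{g for g in genes if counts[g] == 1} for genes in all_common_genes]
-- ===== Notes on version B (the rewrite author's own statement) =====
-- stated objective: faster
-- what changed: Instead of rebuilding, for every list, the union of all the other lists (O(n*total)), B makes one pass that counts for each gene how many lists contain it, then keeps per list the genes whose count is 1 (O(total)).
import Mathlib
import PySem

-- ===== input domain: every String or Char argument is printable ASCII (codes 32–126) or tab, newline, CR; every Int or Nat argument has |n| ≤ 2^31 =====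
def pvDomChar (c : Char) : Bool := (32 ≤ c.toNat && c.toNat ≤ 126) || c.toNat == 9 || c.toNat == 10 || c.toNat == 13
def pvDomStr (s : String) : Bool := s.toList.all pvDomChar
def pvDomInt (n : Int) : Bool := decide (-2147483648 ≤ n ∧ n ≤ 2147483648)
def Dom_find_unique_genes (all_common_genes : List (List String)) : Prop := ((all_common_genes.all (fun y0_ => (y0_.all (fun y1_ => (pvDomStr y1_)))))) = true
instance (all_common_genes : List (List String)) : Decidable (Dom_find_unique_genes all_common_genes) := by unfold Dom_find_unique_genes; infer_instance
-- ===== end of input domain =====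

-- B replaces A's per-list union over all other lists by one global gene→number-of-lists-containing-it
-- count, keeping per list the genes counted once (objective: faster, asymptotic).
-- Return values are Python sets: equality is proved on their PySem.Set (first-insertion-order) representations.

-- ===== PORT A =====
def find_unique_genes (all_common_genes : List (List String)) : List (List String) :=
  (PySem.List.enumerate all_common_genes).foldl
    (fun all_unique_genes p =>
      let unique_genes : PySem.Set String :=
        if all_common_genes.length > 1 then
          -- set().union(*all_common_genes[:i], *all_common_genes[i+1:])
          let other_genes : PySem.Set String :=
            (PySem.List.slice all_common_genes none (some p.1) ++
             PySem.List.slice all_common_genes (some (p.1 + 1)) none).foldl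
              (fun s l => PySem.Set.union s l) PySem.Set.empty
          PySem.Set.diff (PySem.Set.ofList p.2) other_genes
        else PySem.Set.ofList p.2
      all_unique_genes ++ [unique_genes]) []

-- ===== PORT B =====
-- B-side helper: the gene → number-of-lists-containing-it dict ('counts' in Source B)
def pvCounts (all_common_genes : List (List String)) : PySem.Dict String Int :=
  all_common_genes.foldl
    (fun d genes =>
      (PySem.Set.ofList genes).foldl (fun d g => d.insert g (d.getD g 0 + 1)) d)
    PySem.Dict.empty

def find_unique_genes_alt (all_common_genes : List (List String)) : List (List String) :=
  let counts := pvCounts all_common_genes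
  all_common_genes.map
    (fun genes => PySem.Set.ofList (genes.filter (fun g => counts.getD g 0 == 1)))

-- ===== PRECONDITION & SPEC =====
def Spec_find_unique_genes (all_common_genes : List (List String)) (out : List (List String)) : Prop := out = find_unique_genes_alt all_common_genes
instance (all_common_genes : List (List String)) (out : List (List String)) : Decidable (Spec_find_unique_genes all_common_genes out) := by unfold Spec_find_unique_genes; infer_instance

-- ===== CLAIM (what is proved, stated in full; the proofs are below) =====
def Claim_equal_find_unique_genes : Prop := ∀ (all_common_genes : List (List String)), Dom_find_unique_genes all_common_genes → Spec_find_unique_genes all_common_genes (find_unique_genes all_common_genes)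

-- ===== LEMMAS AND PROOFS =====

-- counts.getD g 0 counts the lists of ls that contain g (plus whatever d already held)
lemma pv_counts_getD (ls : List (List String)) (d : PySem.Dict String Int) (g : String) :
    (ls.foldl
      (fun d genes =>
        (PySem.Set.ofList genes).foldl (fun d g => d.insert g (d.getD g 0 + 1)) d)
      d).getD g 0
    = d.getD g 0 + (ls.countP (fun l => decide (g ∈ l)) : Int) := by
  induction ls generalizing d with
  | nil => simp
  | cons a t ih =>
      rw [List.foldl_cons, ih, PySem.Dict.getD_foldl_insert_add_one, List.countP_cons]
      by_cases h : g ∈ a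
      · rw [List.count_eq_one_of_mem (PySem.Set.nodup_ofList a) ((PySem.Set.mem_ofList a g).mpr h)]
        simp only [h, decide_true, if_pos]
        push_cast
        ring
      · rw [List.count_eq_zero.mpr (fun hc => h ((PySem.Set.mem_ofList a g).mp hc))]
        simp [h]

lemma pv_mem_foldl_union (ls : List (List String)) (s : PySem.Set String) (g : String) :
    g ∈ ls.foldl (fun s l => PySem.Set.union s l) s ↔ g ∈ s ∨ ∃ l ∈ ls, g ∈ l := by
  induction ls generalizing s with
  | nil => simp
  | cons a t ih => simp [ih, PySem.Set.mem_union]; tauto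

lemma pv_ofList_cons (x : String) (t : List String) :
    PySem.Set.ofList (x :: t) = x :: (PySem.Set.ofList t).filter (fun y => !(y == x)) := by
  have h1 : PySem.Set.ofList (x :: t) = PySem.Set.update (PySem.Set.add PySem.Set.empty x) t := rfl
  rw [h1, PySem.Set.update_eq_append_filter]
  have h2 : PySem.Set.add (PySem.Set.empty (α := String)) x = [x] := rfl
  rw [h2]
  simp only [List.singleton_append, List.cons.injEq, true_and]
  apply List.filter_congr
  intro y _
  rw [PySem.Set.contains_eq_decide]
  cases h : (y == x)
  · simp_all
  · simp_all

lemma pv_ofList_filter (l : List String) (p : String → Bool) :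
    PySem.Set.ofList (l.filter p) = (PySem.Set.ofList l).filter p := by
  induction l with
  | nil => rfl
  | cons x t ih =>
      by_cases hp : p x
      · rw [List.filter_cons_of_pos hp, pv_ofList_cons, pv_ofList_cons, ih,
            List.filter_cons_of_pos hp, List.filter_filter, List.filter_filter]
        congr 1
        apply List.filter_congr
        intro y _
        cases h : (y == x)
        · simp
        · simp [beq_iff_eq.mp h]
      · rw [List.filter_cons_of_neg hp, pv_ofList_cons, ih,
            List.filter_cons_of_neg hp, List.filter_filter]
        apply List.filter_congr
        intro y _
        by_cases hyx : y = x
        · subst hyx; simp [hp]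
        · simp [hyx]


-- the per-index core: A's set difference equals B's count==1 filter
lemma pv_key (xs : List (List String)) (i : Nat) (hi : i < xs.length) :
    (if xs.length > 1 then
      PySem.Set.diff (PySem.Set.ofList xs[i])
        ((xs.take i ++ xs.drop (i + 1)).foldl (fun s l => PySem.Set.union s l) PySem.Set.empty)
     else PySem.Set.ofList xs[i])
    = PySem.Set.ofList (xs[i].filter (fun g => (pvCounts xs).getD g 0 == 1)) := by
  rw [pv_ofList_filter]
  have hsplit : ∀ g : String, g ∈ xs[i] →
      (pvCounts xs).getD g 0
        = ((xs.take i).countP (fun l => decide (g ∈ l)) : Int) + 1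
          + ((xs.drop (i + 1)).countP (fun l => decide (g ∈ l)) : Int) := by
    intro g hg
    unfold pvCounts
    rw [pv_counts_getD]
    have hx : xs = xs.take i ++ xs[i] :: xs.drop (i + 1) := by
      rw [List.getElem_cons_drop, List.take_append_drop]
    conv_lhs => rw [hx]
    rw [List.countP_append, List.countP_cons]
    simp [hg]
    ring
  by_cases hlen : xs.length > 1
  · rw [if_pos hlen]
    have hdiff : PySem.Set.diff (PySem.Set.ofList xs[i])
        ((xs.take i ++ xs.drop (i + 1)).foldl (fun s l => PySem.Set.union s l) PySem.Set.empty)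
        = (PySem.Set.ofList xs[i]).filter
            (fun g => !(PySem.Set.contains
              ((xs.take i ++ xs.drop (i + 1)).foldl (fun s l => PySem.Set.union s l) PySem.Set.empty) g)) := by
      simp [PySem.Set.diff]
    rw [hdiff]
    apply List.filter_congr
    intro g hg
    have hgmem : g ∈ xs[i] := (PySem.Set.mem_ofList _ g).mp hg
    rw [PySem.Set.contains_eq_decide, hsplit g hgmem]
    rw [Bool.eq_iff_iff]
    simp only [Bool.not_eq_true', decide_eq_false_iff_not, pv_mem_foldl_union, beq_iff_eq, List.mem_append]
    constructor
    · intro h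
      have ha : (xs.take i).countP (fun l => decide (g ∈ l)) = 0 :=
        List.countP_eq_zero.mpr (fun l hl => by simp; intro hgl; exact h (Or.inr ⟨l, Or.inl hl, hgl⟩))
      have hb : (xs.drop (i + 1)).countP (fun l => decide (g ∈ l)) = 0 :=
        List.countP_eq_zero.mpr (fun l hl => by simp; intro hgl; exact h (Or.inr ⟨l, Or.inr hl, hgl⟩))
      rw [ha, hb]; ring
    · intro h hcon
      rcases hcon with hemp | ⟨l, hl, hgl⟩
      · simp [PySem.Set.empty] at hemp
      · rcases hl with hl | hl
        · have : 0 < (xs.take i).countP (fun l => decide (g ∈ l)) :=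
            List.countP_pos_iff.mpr ⟨l, hl, by simpa⟩
          omega
        · have : 0 < (xs.drop (i + 1)).countP (fun l => decide (g ∈ l)) :=
            List.countP_pos_iff.mpr ⟨l, hl, by simpa⟩
          omega
  · rw [if_neg hlen]
    apply (List.filter_eq_self.mpr _).symm
    intro g hg
    have hgmem : g ∈ xs[i] := (PySem.Set.mem_ofList _ g).mp hg
    rw [hsplit g hgmem]
    have h0 : xs.take i = [] ∧ xs.drop (i + 1) = [] := by
      constructor
      · have : i = 0 := by omega
        simp [this]
      · apply List.drop_eq_nil_of_le; omega
    rw [h0.1, h0.2]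
    simp

-- ===== VERDICT (by name: the statement is the Claim_ definition above) =====
theorem find_unique_genes_spec : Claim_equal_find_unique_genes := by
  intro xs _
  unfold Spec_find_unique_genes find_unique_genes find_unique_genes_alt
  rw [PySem.List.foldl_append_singleton_eq_map, List.nil_append]
  apply List.ext_getElem
  · simp [PySem.List.length_enumerate]
  · intro k hk1 hk2
    simp only [List.getElem_map, PySem.List.getElem_enumerate]
    have hk : k < xs.length := by simpa [PySem.List.length_enumerate] using hk1
    have h1 : PySem.List.slice xs none (some ((0 : Int) + (k : Nat))) = xs.take k := by
      rw [zero_add]; exact PySem.List.slice_to_natCast xs k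
    have h2 : PySem.List.slice xs (some ((0 : Int) + (k : Nat) + 1)) none = xs.drop (k + 1) := by
      rw [zero_add, show ((k : Int) + 1) = ((k + 1 : Nat) : Int) by push_cast; ring]
      exact PySem.List.slice_from_natCast xs (k + 1)
    rw [h1, h2]
    exact pv_key xs k hk
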